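-- pv_equiv track=rewrite | github.com/kimtaehyuk1/come_on-codingtest | 프로그래머스/광물 캐기.py | solution
-- ===== SOURCE A (Python) =====
-- from collections import deque
--
-- def solution(picks, minerals):
--     answer = 0
--
--     minerals_deque = deque() #popleft 하기위해
--
--     for i in minerals:
--         minerals_deque.append(i)
--
--
--     #  picks도 순서가 고정되있고, minerals도 차례대로 캘 수 있으니 이점 이용
--     # 다이아처리
--     dia = picks[0]*5
--     for _ in range(dia): #이만큼 돌면서 다이아는 1이니까 한번 돌때 한개씩 뺴주면됨
--         if minerals_deque:
--             minerals_deque.popleft()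
--             answer += 1
--         else:
--             break
--
--     # 철 처리
--     iro = picks[1]*5 #일단 개수로는 이만큼 처리할건데 피로도를 곁들여야겠죠
--     for _ in range(iro):
--         if minerals_deque:
--             tmp1 = minerals_deque.popleft()
--             if tmp1 == 'diamond':
--                 answer += 5
--             else:
--                 answer += 1
--         else:
--             break
--
--     # 돌 처리
--     sto = picks[2]*5
--     for _ in range(sto):
--         if minerals_deque:
--             tmp2 = minerals_deque.popleft()
--             if tmp2 == 'diamond':
--                 answer += 25
--             if tmp2 == 'iron':
--                 answer += 5
--             if tmp2 == 'stone':
--                 answer += 1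
--         else:
--             break
--
--     return answer
-- ===== SOURCE B (Python) =====
-- def solution(picks, minerals):
--     t0 = max(picks[0], 0) * 5
--     t1 = t0 + max(picks[1], 0) * 5
--     t2 = t1 + max(picks[2], 0) * 5
--     stone_cost = {'diamond': 25, 'iron': 5, 'stone': 1}
--     return (min(len(minerals), t0)
--             + sum(5 if m == 'diamond' else 1 for m in minerals[t0:t1])
--             + sum(stone_cost.get(m, 0) for m in minerals[t1:t2]))
-- ===== Notes on version B (the rewrite author's own statement) =====
-- stated objective: simpler
-- what changed: Replaced the deque copy and three popping loops by cumulative swing thresholds (5 swings per pick, negative picks clamped to 0): the diamond tier is the closed form min(len(minerals), t0) and the iron/stone tiers are sums over the slices minerals[t0:t1] and minerals[t1:t2] with a cost table.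
import Mathlib
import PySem

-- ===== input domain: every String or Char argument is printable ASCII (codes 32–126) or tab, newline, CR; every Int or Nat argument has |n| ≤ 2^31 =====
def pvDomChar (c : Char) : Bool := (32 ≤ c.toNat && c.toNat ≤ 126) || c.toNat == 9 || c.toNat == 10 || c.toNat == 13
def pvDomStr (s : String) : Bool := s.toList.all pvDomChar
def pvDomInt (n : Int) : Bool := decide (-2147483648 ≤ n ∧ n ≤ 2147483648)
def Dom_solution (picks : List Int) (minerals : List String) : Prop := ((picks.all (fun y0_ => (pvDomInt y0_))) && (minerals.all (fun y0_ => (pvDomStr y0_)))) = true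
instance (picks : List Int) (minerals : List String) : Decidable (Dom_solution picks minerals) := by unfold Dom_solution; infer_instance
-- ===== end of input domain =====

-- B replaces A's three deque-popping loops by cumulative swing thresholds, one closed-form term
-- for the diamond tier and two slice-based sums (objective: simpler).

-- ===== PORT A =====
-- one 'for _ in range(fuel)' loop of A: pops the front while the deque is non-empty, adding cost
def mineLoop (fuel : Nat) (dq : List String) (answer : Int) (cost : String → Int) : Int × List String :=
  match fuel, dq with
  | 0, dq => (answer, dq)
  | _ + 1, [] => (answer, [])
  | f + 1, m :: rest => mineLoop f rest (answer + cost m) cost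

def solution (picks : List Int) (minerals : List String) : Int :=
  let dq0 : List String := minerals.foldl (fun d i => d ++ [i]) []
  let dia := (PySem.List.pyGet? picks 0).getD 0 * 5
  let r1 := mineLoop dia.toNat dq0 0 (fun _ => 1)
  let iro := (PySem.List.pyGet? picks 1).getD 0 * 5
  let r2 := mineLoop iro.toNat r1.2 r1.1 (fun t => if t = "diamond" then 5 else 1)
  let sto := (PySem.List.pyGet? picks 2).getD 0 * 5
  let r3 := mineLoop sto.toNat r2.2 r2.1
      (fun t => (if t = "diamond" then 25 else 0) + (if t = "iron" then 5 else 0)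
                + (if t = "stone" then 1 else 0))
  r3.1

-- ===== PORT B =====
def solution_alt (picks : List Int) (minerals : List String) : Int :=
  let t0 := max ((PySem.List.pyGet? picks 0).getD 0) 0 * 5
  let t1 := t0 + max ((PySem.List.pyGet? picks 1).getD 0) 0 * 5
  let t2 := t1 + max ((PySem.List.pyGet? picks 2).getD 0) 0 * 5
  let stoneCost : PySem.Dict String Int := PySem.Dict.ofList [("diamond", 25), ("iron", 5), ("stone", 1)]
  min (minerals.length : Int) t0
    + ((PySem.List.slice minerals (some t0) (some t1)).map
        (fun m => if m = "diamond" then (5 : Int) else 1)).sum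
    + ((PySem.List.slice minerals (some t1) (some t2)).map
        (fun m => stoneCost.getD m 0)).sum

-- ===== PRECONDITION & SPEC =====
-- Pre_ excludes only inputs where A raises IndexError: picks must have the three pick counts.
def Pre_solution (picks : List Int) (minerals : List String) : Prop := 3 ≤ picks.length
instance (picks : List Int) (minerals : List String) : Decidable (Pre_solution picks minerals) := by
  unfold Pre_solution; infer_instance
def pvWitness_solution : List Int × List String := ([1, 1, 1], ["diamond", "iron", "stone"])

def Spec_solution (picks : List Int) (minerals : List String) (out : Int) : Prop := out = solution_alt picks minerals
instance (picks : List Int) (minerals : List String) (out : Int) : Decidable (Spec_solution picks minerals out) := by unfold Spec_solution; infer_instance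

-- ===== CLAIM (what is proved, stated in full; the proofs are below) =====
def Claim_equal_solution : Prop := ∀ (picks : List Int) (minerals : List String), Dom_solution picks minerals → Pre_solution picks minerals → Spec_solution picks minerals (solution picks minerals)

-- ===== LEMMAS AND PROOFS =====

theorem mineLoop_eq (fuel : Nat) (dq : List String) (answer : Int) (cost : String → Int) :
    mineLoop fuel dq answer cost
      = (answer + ((dq.take fuel).map cost).sum, dq.drop fuel) := by
  induction fuel generalizing dq answer with
  | zero => simp [mineLoop]
  | succ f ih =>
    cases dq with
    | nil => simp [mineLoop]
    | cons m rest => simp [mineLoop, ih]; ring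

theorem foldl_append_id (l : List String) (acc : List String) :
    l.foldl (fun d i => d ++ [i]) acc = acc ++ l := by
  induction l generalizing acc with
  | nil => simp
  | cons x xs ih => simp [List.foldl, ih]

theorem sum_map_one (l : List String) : (l.map (fun _ => (1 : Int))).sum = l.length := by
  induction l with
  | nil => simp
  | cons x xs _ => simp; omega

theorem stone_cost_eq (m : String) :
    (PySem.Dict.ofList [("diamond", (25 : Int)), ("iron", 5), ("stone", 1)]).getD m 0
      = (if m = "diamond" then 25 else 0) + (if m = "iron" then 5 else 0)
        + (if m = "stone" then 1 else 0) := by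
  have hmk : PySem.Dict.ofList [("diamond", (25 : Int)), ("iron", 5), ("stone", 1)]
      = PySem.Dict.mk [("diamond", 25), ("iron", 5), ("stone", 1)] := by decide
  rw [hmk, PySem.Dict.getD, PySem.Dict.get?_mk_cons, PySem.Dict.get?_mk_cons,
    PySem.Dict.get?_mk_cons]
  by_cases h1 : m = "diamond"
  · simp [h1]
  · by_cases h2 : m = "iron"
    · simp [h2]
    · by_cases h3 : m = "stone"
      · simp [h3]
      · simp [h1, h2, h3, Ne.symm h1, Ne.symm h2, Ne.symm h3, PySem.Dict.get?]

theorem solution_spec : Claim_equal_solution := by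
  intro picks minerals _ hpre
  unfold Spec_solution
  obtain ⟨p0, p1, p2, rest, rfl⟩ :
      ∃ p0 p1 p2 rest, picks = p0 :: p1 :: p2 :: rest := by
    match picks, hpre with
    | p0 :: p1 :: p2 :: rest, _ => exact ⟨p0, p1, p2, rest, rfl⟩
  have e0 : PySem.List.pyGet? (p0 :: p1 :: p2 :: rest) 0 = some p0 := by simp [pysem]
  have e1 : PySem.List.pyGet? (p0 :: p1 :: p2 :: rest) 1 = some p1 := by simp [pysem]
  have e2 : PySem.List.pyGet? (p0 :: p1 :: p2 :: rest) 2 = some p2 := by simp [pysem]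
  simp only [solution, solution_alt, e0, e1, e2, Option.getD_some, foldl_append_id,
    List.nil_append, mineLoop_eq]
  set a := (p0 * 5).toNat with ha
  set b := (p1 * 5).toNat with hb
  set c := (p2 * 5).toNat with hc
  rw [show max p0 0 * 5 = (a : Int) by omega, show max p1 0 * 5 = (b : Int) by omega,
    show max p2 0 * 5 = (c : Int) by omega,
    show (a : Int) + b = ((a + b : Nat) : Int) by push_cast; ring,
    show ((a + b : Nat) : Int) + c = ((a + b + c : Nat) : Int) by push_cast; ring,
    PySem.List.slice_natCast, PySem.List.slice_natCast,
    List.drop_drop, sum_map_one, List.length_take]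
  simp only [Nat.add_sub_cancel_left, stone_cost_eq]
  generalize (((minerals.drop a).take b).map
      (fun m => if m = "diamond" then (5 : Int) else 1)).sum = S2
  generalize (((minerals.drop (a + b)).take c).map
      (fun m => (if m = "diamond" then (25 : Int) else 0) + (if m = "iron" then 5 else 0)
        + (if m = "stone" then 1 else 0))).sum = S3
  push_cast
  omega

-- ===== VERDICT (by name: the statement is the Claim_ definition above) =====
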